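-- pv_equiv track=rewrite | github.com/clarkey1993/f1-fantasy-2026 | f1_config.py | app_constructor_to_fastf1
-- ===== SOURCE A (Python) =====
-- import unicodedata
--
-- CONSTRUCTOR_MAP = {
--     "Red Bull": "Red Bull Racing",
--     "Racing Bulls": "Racing Bulls",
--     "Haas": "Haas F1 Team",
--     "Audi": "Audi",
--     "Cadillac": "Cadillac",
--     "Aston Martin": "Aston Martin",
--     "Ferrari": "Ferrari",
--     "McLaren": "McLaren",
--     "Mercedes": "Mercedes",
--     "Alpine": "Alpine",
--     "Williams": "Williams",
-- }
--
-- def app_constructor_to_fastf1(team_name):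
--     """
--     Map player constructor pick to FastF1 TeamName (session.results['TeamName']).
--     Same resolution for leaderboard sync, debug breakdown, and signup flows:
--     NFKC normalize + strip, exact case-insensitive match on CONSTRUCTOR_MAP keys,
--     then longest-key-first substring match (reduces ambiguous partial matches).
--     """
--     if team_name is None:
--         return ""
--     s = unicodedata.normalize("NFKC", str(team_name)).strip()
--     if not s:
--         return s
--     s_lower = s.lower()
--     for app_name, ff1_name in CONSTRUCTOR_MAP.items():
--         if app_name.lower() == s_lower:
--             return ff1_name
--     for app_name, ff1_name in sorted(CONSTRUCTOR_MAP.items(), key=lambda kv: -len(kv[0])):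
--         if app_name.lower() in s_lower:
--             return ff1_name
--     return s
-- ===== SOURCE B (Python) =====
-- import unicodedata
--
-- CONSTRUCTOR_MAP = {
--     "Red Bull": "Red Bull Racing",
--     "Racing Bulls": "Racing Bulls",
--     "Haas": "Haas F1 Team",
--     "Audi": "Audi",
--     "Cadillac": "Cadillac",
--     "Aston Martin": "Aston Martin",
--     "Ferrari": "Ferrari",
--     "McLaren": "McLaren",
--     "Mercedes": "Mercedes",
--     "Alpine": "Alpine",
--     "Williams": "Williams",
-- }
--
-- def app_constructor_to_fastf1(team_name):
--     # Same preamble; then ONE unsorted pass keeping the best substring match,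
--     # ranked by (key length, earliest insertion index).  An exact match is the
--     # longest possible match, so no separate exact-match pass is needed.
--     if team_name is None:
--         return ""
--     s = unicodedata.normalize("NFKC", str(team_name)).strip()
--     if not s:
--         return s
--     s_lower = s.lower()
--     best_rank = None
--     best_value = None
--     for i, (k, v) in enumerate(CONSTRUCTOR_MAP.items()):
--         if k.lower() in s_lower:
--             rank = (len(k), -i)
--             if best_rank is None or rank > best_rank:
--                 best_rank, best_value = rank, v
--     return best_value if best_value is not None else s
-- ===== Notes on version B (the rewrite author's own statement) =====
-- stated objective: simpler
-- what changed: B replaces A's two scans (exact case-insensitive pass, then a substring pass over the items sorted by descending key length) with one unsorted pass that keeps the best substring match ranked by (key length, earliest insertion index); an exact match is necessarily the longest match, so the dedicated exact pass and the sort both disappear.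
import Mathlib
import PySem

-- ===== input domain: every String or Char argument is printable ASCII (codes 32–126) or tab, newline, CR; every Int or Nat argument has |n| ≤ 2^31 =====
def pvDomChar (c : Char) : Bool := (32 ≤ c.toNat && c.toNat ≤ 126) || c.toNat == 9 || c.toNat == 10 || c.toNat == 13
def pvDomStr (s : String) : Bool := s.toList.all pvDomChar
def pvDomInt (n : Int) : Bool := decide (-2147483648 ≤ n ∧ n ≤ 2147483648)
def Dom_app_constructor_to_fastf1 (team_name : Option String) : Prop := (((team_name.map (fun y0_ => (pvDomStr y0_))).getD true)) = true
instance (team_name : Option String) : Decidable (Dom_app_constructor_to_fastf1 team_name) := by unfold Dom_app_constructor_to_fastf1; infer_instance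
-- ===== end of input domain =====

-- B drops A's exact-match pass and the sort, keeping instead the best substring
-- match by (key length, earliest insertion index) in one unsorted pass (same results).
-- unicodedata.normalize("NFKC", ·) is the identity on the printable-ASCII domain Dom_,
-- and str(·) is the identity on a str argument, so both are ported as the identity.

-- ===== PORT A =====
def pvMap : List (String × String) :=
  [("Red Bull", "Red Bull Racing"), ("Racing Bulls", "Racing Bulls"),
   ("Haas", "Haas F1 Team"), ("Audi", "Audi"), ("Cadillac", "Cadillac"),
   ("Aston Martin", "Aston Martin"), ("Ferrari", "Ferrari"), ("McLaren", "McLaren"),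
   ("Mercedes", "Mercedes"), ("Alpine", "Alpine"), ("Williams", "Williams")]

-- A's first loop: for app_name, ff1_name in CONSTRUCTOR_MAP.items(): if app_name.lower() == s_lower: return ff1_name
def pvScanExact (s_lower : String) : List (String × String) → Option String
  | [] => none
  | (k, v) :: rest =>
    if PySem.Str.lower k == s_lower then some v else pvScanExact s_lower rest

-- A's second loop: for app_name, ff1_name in sorted(..., key=lambda kv: -len(kv[0])): if app_name.lower() in s_lower: return ff1_name
def pvScanSub (s_lower : String) : List (String × String) → Option String
  | [] => none
  | (k, v) :: rest =>
    if PySem.Str.isIn (PySem.Str.lower k) s_lower then some v else pvScanSub s_lower rest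

def app_constructor_to_fastf1 (team_name : Option String) : String :=
  match team_name with
  | none => ""
  | some tn =>
    let s := PySem.Str.strip tn
    if s == "" then s
    else
      let s_lower := PySem.Str.lower s
      match pvScanExact s_lower pvMap with
      | some v => v
      | none =>
        match pvScanSub s_lower
            (PySem.List.sorted pvMap (fun kv => -(PySem.Str.len kv.1 : Int)) false) with
        | some v => v
        | none => s

-- ===== PORT B =====
-- B's single loop over enumerate(CONSTRUCTOR_MAP.items()): keep the best substring
-- match, ranked by the tuple (len(k), -i); a later match wins only on a strictly greater rank.
def pvBest (s_lower : String) :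
    List (Int × (String × String)) → Option ((Int × Int) × String) → Option ((Int × Int) × String)
  | [], best => best
  | (i, (k, v)) :: rest, best =>
    if PySem.Str.isIn (PySem.Str.lower k) s_lower then
      let rank : Int × Int := ((PySem.Str.len k : Int), -i)
      match best with
      | none => pvBest s_lower rest (some (rank, v))
      | some (br, bv) =>
        if br.1 < rank.1 ∨ (br.1 = rank.1 ∧ br.2 < rank.2) then
          pvBest s_lower rest (some (rank, v))
        else pvBest s_lower rest (some (br, bv))
    else pvBest s_lower rest best

def app_constructor_to_fastf1_alt (team_name : Option String) : String :=
  match team_name with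
  | none => ""
  | some tn =>
    let s := PySem.Str.strip tn
    if s == "" then s
    else
      let s_lower := PySem.Str.lower s
      match pvBest s_lower (PySem.List.enumerate pvMap) none with
      | some (_, v) => v
      | none => s

-- ===== PRECONDITION & SPEC =====
def Spec_app_constructor_to_fastf1 (team_name : Option String) (out : String) : Prop := out = app_constructor_to_fastf1_alt team_name
instance (team_name : Option String) (out : String) : Decidable (Spec_app_constructor_to_fastf1 team_name out) := by unfold Spec_app_constructor_to_fastf1; infer_instance

-- ===== CLAIM (what is proved, stated in full; the proofs are below) =====
def Claim_equal_app_constructor_to_fastf1 : Prop := ∀ (team_name : Option String), Dom_app_constructor_to_fastf1 team_name → Spec_app_constructor_to_fastf1 team_name (app_constructor_to_fastf1 team_name)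

-- ===== LEMMAS AND PROOFS =====

-- proof-side copies of the two scans with the substring tests abstracted to a boolean list,
-- so that the final comparison can be decided over the 11 test outcomes
def pvScanSubB : List (String × String) → List Bool → Option String
  | [], _ => none
  | _ :: _, [] => none
  | (_, v) :: rest, b :: bs => if b then some v else pvScanSubB rest bs

def pvBestB : List (Int × (String × String)) → List Bool →
    Option ((Int × Int) × String) → Option ((Int × Int) × String)
  | [], _, best => best
  | _ :: _, [], best => best
  | (i, (k, v)) :: rest, b :: bs, best =>
    if b then
      let rank : Int × Int := ((PySem.Str.len k : Int), -i)
      match best with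
      | none => pvBestB rest bs (some (rank, v))
      | some (br, bv) =>
        if br.1 < rank.1 ∨ (br.1 = rank.1 ∧ br.2 < rank.2) then
          pvBestB rest bs (some (rank, v))
        else pvBestB rest bs (some (br, bv))
    else pvBestB rest bs best

theorem pvScanSub_eq_B (sl : String) (l : List (String × String)) :
    pvScanSub sl l = pvScanSubB l (l.map fun kv => PySem.Str.isIn (PySem.Str.lower kv.1) sl) := by
  induction l with
  | nil => rfl
  | cons hd tl ih =>
    obtain ⟨k, v⟩ := hd
    simp only [pvScanSub, pvScanSubB, List.map]
    by_cases h : PySem.Str.isIn (PySem.Str.lower k) sl <;> simp [ih]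

theorem pvBest_eq_B (sl : String) (l : List (Int × (String × String))) :
    ∀ best, pvBest sl l best =
      pvBestB l (l.map fun p => PySem.Str.isIn (PySem.Str.lower p.2.1) sl) best := by
  induction l with
  | nil => intro best; rfl
  | cons hd tl ih =>
    intro best
    obtain ⟨i, k, v⟩ := hd
    simp only [pvBest, pvBestB, List.map]
    by_cases h : PySem.Str.isIn (PySem.Str.lower k) sl
    · simp only [h, if_true]
      cases best with
      | none => exact ih _
      | some b =>
        obtain ⟨br, bv⟩ := b
        by_cases h2 : br.1 < (PySem.Str.len k : Int) ∨ (br.1 = (PySem.Str.len k : Int) ∧ br.2 < -i) <;>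
          simp [ih]
    · simp [ih]

-- the core: on every lowered string, A's two-pass search agrees with B's one-pass best match
set_option maxHeartbeats 2000000 in
theorem pv_core (sl : String) :
    (match pvScanExact sl pvMap with
     | some v => some v
     | none => pvScanSub sl
         (PySem.List.sorted pvMap (fun kv => -(PySem.Str.len kv.1 : Int)) false)) =
    (match pvBest sl (PySem.List.enumerate pvMap) none with
     | some (_, v) => some v
     | none => none) := by
  have hs : PySem.List.sorted pvMap (fun kv => -(PySem.Str.len kv.1 : Int)) false =
    [("Racing Bulls", "Racing Bulls"), ("Aston Martin", "Aston Martin"),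
     ("Red Bull", "Red Bull Racing"), ("Cadillac", "Cadillac"), ("Mercedes", "Mercedes"),
     ("Williams", "Williams"), ("Ferrari", "Ferrari"), ("McLaren", "McLaren"),
     ("Alpine", "Alpine"), ("Haas", "Haas F1 Team"), ("Audi", "Audi")] := by decide
  have he : PySem.List.enumerate pvMap = [((0:Int), ("Red Bull", "Red Bull Racing")), (1, ("Racing Bulls", "Racing Bulls")), (2, ("Haas", "Haas F1 Team")), (3, ("Audi", "Audi")), (4, ("Cadillac", "Cadillac")), (5, ("Aston Martin", "Aston Martin")), (6, ("Ferrari", "Ferrari")), (7, ("McLaren", "McLaren")), (8, ("Mercedes", "Mercedes")), (9, ("Alpine", "Alpine")), (10, ("Williams", "Williams"))] := by decide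
  rw [hs, he]
  by_cases h1 : PySem.Str.lower "Red Bull" == sl
  · obtain rfl : sl = "red bull" := by simpa using (eq_of_beq h1).symm
    decide
  by_cases h2 : PySem.Str.lower "Racing Bulls" == sl
  · obtain rfl : sl = "racing bulls" := by simpa using (eq_of_beq h2).symm
    decide
  by_cases h3 : PySem.Str.lower "Haas" == sl
  · obtain rfl : sl = "haas" := by simpa using (eq_of_beq h3).symm
    decide
  by_cases h4 : PySem.Str.lower "Audi" == sl
  · obtain rfl : sl = "audi" := by simpa using (eq_of_beq h4).symm
    decide
  by_cases h5 : PySem.Str.lower "Cadillac" == sl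
  · obtain rfl : sl = "cadillac" := by simpa using (eq_of_beq h5).symm
    decide
  by_cases h6 : PySem.Str.lower "Aston Martin" == sl
  · obtain rfl : sl = "aston martin" := by simpa using (eq_of_beq h6).symm
    decide
  by_cases h7 : PySem.Str.lower "Ferrari" == sl
  · obtain rfl : sl = "ferrari" := by simpa using (eq_of_beq h7).symm
    decide
  by_cases h8 : PySem.Str.lower "McLaren" == sl
  · obtain rfl : sl = "mclaren" := by simpa using (eq_of_beq h8).symm
    decide
  by_cases h9 : PySem.Str.lower "Mercedes" == sl
  · obtain rfl : sl = "mercedes" := by simpa using (eq_of_beq h9).symm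
    decide
  by_cases h10 : PySem.Str.lower "Alpine" == sl
  · obtain rfl : sl = "alpine" := by simpa using (eq_of_beq h10).symm
    decide
  by_cases h11 : PySem.Str.lower "Williams" == sl
  · obtain rfl : sl = "williams" := by simpa using (eq_of_beq h11).symm
    decide
  have hex : pvScanExact sl pvMap = none := by
    simp [pvScanExact, pvMap, h1, h2, h3, h4, h5, h6, h7, h8, h9, h10, h11]
  rw [hex, pvScanSub_eq_B, pvBest_eq_B]
  simp only [List.map]
  generalize PySem.Str.isIn (PySem.Str.lower "Red Bull") sl = b1
  generalize PySem.Str.isIn (PySem.Str.lower "Racing Bulls") sl = b2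
  generalize PySem.Str.isIn (PySem.Str.lower "Haas") sl = b3
  generalize PySem.Str.isIn (PySem.Str.lower "Audi") sl = b4
  generalize PySem.Str.isIn (PySem.Str.lower "Cadillac") sl = b5
  generalize PySem.Str.isIn (PySem.Str.lower "Aston Martin") sl = b6
  generalize PySem.Str.isIn (PySem.Str.lower "Ferrari") sl = b7
  generalize PySem.Str.isIn (PySem.Str.lower "McLaren") sl = b8
  generalize PySem.Str.isIn (PySem.Str.lower "Mercedes") sl = b9
  generalize PySem.Str.isIn (PySem.Str.lower "Alpine") sl = b10
  generalize PySem.Str.isIn (PySem.Str.lower "Williams") sl = b11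
  revert b1 b2 b3 b4 b5 b6 b7 b8 b9 b10 b11
  decide

-- ===== VERDICT (by name: the statement is the Claim_ definition above) =====
theorem app_constructor_to_fastf1_spec : Claim_equal_app_constructor_to_fastf1 := by
  intro team_name _
  unfold Spec_app_constructor_to_fastf1 app_constructor_to_fastf1 app_constructor_to_fastf1_alt
  match team_name with
  | none => rfl
  | some tn =>
    simp only
    by_cases h : PySem.Str.strip tn == ""
    · simp [h]
    · simp only [h]
      have hc := pv_core (PySem.Str.lower (PySem.Str.strip tn))
      revert hc
      cases hE : pvScanExact (PySem.Str.lower (PySem.Str.strip tn)) pvMap <;>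
        cases hB : pvBest (PySem.Str.lower (PySem.Str.strip tn))
            (PySem.List.enumerate pvMap) none <;>
          simp_all
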